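-- pv_equiv track=rewrite | github.com/irenazra/intelligent_daily_planner | source/Genetic_Algorithms.py | detect_illegal_divisions_helper
-- ===== SOURCE A (Python) =====
-- def detect_illegal_divisions_helper(schedule,i,item):
--     score_update = 0
--     saw_another_task = False
--     for j in range(i, len(schedule) - 1):
--         if (schedule[j] == item):
--             if (saw_another_task):
--                 score_update = score_update - 200
--                 break
--         else:
--             saw_another_task = True
--     return score_update
-- ===== SOURCE B (Python) =====
-- def detect_illegal_divisions_helper(schedule, i, item):
--     window = schedule[i:len(schedule)-1]
--     while window and window[0] == item:
--         window = window[1:]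
--     return -200 if item in window else 0
-- ===== Notes on version B (the rewrite author's own statement) =====
-- stated objective: simpler
-- what changed: Replaces the flag-tracking index loop with a slice/drop-leading-run/membership decomposition; Pre_ excludes negative start indices i, which lie outside the helper's natural domain of schedule positions (there A either raises IndexError or its value comes from accidental negative-index wraparound).
-- outside the precondition, e.g. on detect_illegal_divisions_helper([1, 2, 1], -3, 1): A returns -200, B returns 0
import Mathlib
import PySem

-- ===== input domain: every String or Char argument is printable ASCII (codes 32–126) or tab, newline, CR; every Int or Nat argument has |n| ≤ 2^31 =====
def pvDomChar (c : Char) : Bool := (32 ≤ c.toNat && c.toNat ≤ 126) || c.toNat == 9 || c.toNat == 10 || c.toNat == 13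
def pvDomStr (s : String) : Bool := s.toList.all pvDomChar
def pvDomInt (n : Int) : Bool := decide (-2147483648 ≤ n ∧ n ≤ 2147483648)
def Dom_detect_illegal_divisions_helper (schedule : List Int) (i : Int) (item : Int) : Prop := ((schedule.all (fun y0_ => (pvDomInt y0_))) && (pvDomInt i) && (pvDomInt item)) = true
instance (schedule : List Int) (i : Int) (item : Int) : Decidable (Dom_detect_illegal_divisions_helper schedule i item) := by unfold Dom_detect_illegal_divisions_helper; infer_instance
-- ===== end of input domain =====

-- B replaces A's flag-tracking index loop by a slice / drop-leading-run / membership decomposition (same cost, simpler); return-value equivalence on non-negative start indices.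


-- ===== PORT A =====
-- A's for-loop over range(i, len(schedule)-1), with the break, as structural recursion over the range list.
def pvALoop (schedule : List Int) (item : Int) : List Int → Int → Bool → Int
  | [], score, _ => score
  | j :: js, score, saw =>
    match PySem.List.pyGet? schedule j with
    | none => score   -- Python raises IndexError here; excluded by Pre_
    | some v =>
      if v == item then
        if saw then score - 200   -- score_update - 200, then break
        else pvALoop schedule item js score saw
      else pvALoop schedule item js score true

def detect_illegal_divisions_helper (schedule : List Int) (i : Int) (item : Int) : Int :=
  pvALoop schedule item (PySem.List.pyRange i ((schedule.length : Int) - 1) 1) 0 false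

-- ===== PORT B =====
def detect_illegal_divisions_helper_alt (schedule : List Int) (i : Int) (item : Int) : Int :=
  let window := PySem.List.slice schedule (some i) (some ((schedule.length : Int) - 1))
  -- the 'while window and window[0] == item: window = window[1:]' loop IS dropWhile
  let rest := window.dropWhile (fun x => x == item)
  if rest.contains item then -200 else 0

-- ===== PRECONDITION & SPEC =====
-- Pre_ excludes negative start indices i: they lie outside this helper's natural domain of
-- schedule positions — there A either raises IndexError (i < -len, i ≤ -2) or its value comes
-- from accidental negative-index wraparound.
def Pre_detect_illegal_divisions_helper (schedule : List Int) (i : Int) (item : Int) : Prop :=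
  0 ≤ i
instance (schedule : List Int) (i : Int) (item : Int) : Decidable (Pre_detect_illegal_divisions_helper schedule i item) := by unfold Pre_detect_illegal_divisions_helper; infer_instance

def pvWitness_detect_illegal_divisions_helper : List Int × Int × Int := ([1, 2, 1, 3], 0, 1)

def Spec_detect_illegal_divisions_helper (schedule : List Int) (i : Int) (item : Int) (out : Int) : Prop := out = detect_illegal_divisions_helper_alt schedule i item
instance (schedule : List Int) (i : Int) (item : Int) (out : Int) : Decidable (Spec_detect_illegal_divisions_helper schedule i item out) := by unfold Spec_detect_illegal_divisions_helper; infer_instance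

-- ===== CLAIM (what is proved, stated in full; the proofs are below) =====
def Claim_equal_detect_illegal_divisions_helper : Prop := ∀ (schedule : List Int) (i : Int) (item : Int), Dom_detect_illegal_divisions_helper schedule i item → Pre_detect_illegal_divisions_helper schedule i item → Spec_detect_illegal_divisions_helper schedule i item (detect_illegal_divisions_helper schedule i item)

-- ===== LEMMAS AND PROOFS =====

-- pure-value version of A's loop (the indices already dereferenced)
def pvScan (item : Int) : List Int → Int → Bool → Int
  | [], score, _ => score
  | v :: vs, score, saw =>
    if v == item then (if saw then score - 200 else pvScan item vs score saw)
    else pvScan item vs score true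

lemma pvScan_true (item : Int) (vs : List Int) (score : Int) :
    pvScan item vs score true = if vs.contains item then score - 200 else score := by
  induction vs with
  | nil => simp [pvScan]
  | cons v vs ih =>
    by_cases h : v = item
    · simp [pvScan, h]
    · have h' : ¬ item = v := fun hh => h hh.symm
      simp [pvScan, h, h', ih]

lemma pvScan_false (item : Int) (vs : List Int) (score : Int) :
    pvScan item vs score false =
      if (vs.dropWhile (fun x => x == item)).contains item then score - 200 else score := by
  induction vs with
  | nil => simp [pvScan]
  | cons v vs ih =>
    by_cases h : v = item
    · simpa [pvScan, h, List.dropWhile_cons] using ih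
    · have h' : ¬ item = v := fun hh => h hh.symm
      simp [pvScan, h, h', pvScan_true]

lemma pvALoop_eq_pvScan (schedule : List Int) (item : Int) (js : List Int)
    (h : ∀ j ∈ js, PySem.List.pyGet? schedule j = some (PySem.List.pyGetD schedule j 0)) :
    ∀ (score : Int) (saw : Bool),
      pvALoop schedule item js score saw
        = pvScan item (js.map (fun j => PySem.List.pyGetD schedule j 0)) score saw := by
  induction js with
  | nil => intro score saw; simp [pvALoop, pvScan]
  | cons j js ih =>
    intro score saw
    have hj := h j (by simp)
    have hrest : ∀ j' ∈ js, PySem.List.pyGet? schedule j' = some (PySem.List.pyGetD schedule j' 0) :=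
      fun j' hj' => h j' (by simp [hj'])
    simp only [pvALoop, pvScan, hj, List.map_cons]
    by_cases hv : PySem.List.pyGetD schedule j 0 = item
    · cases saw <;> simp [hv, ih hrest]
    · simp [hv, ih hrest]

lemma pyGet?_eq_some_pyGetD (schedule : List Int) (j : Int)
    (h1 : -(schedule.length : Int) ≤ j) (h2 : j < (schedule.length : Int)) :
    PySem.List.pyGet? schedule j = some (PySem.List.pyGetD schedule j 0) := by
  have hn : PySem.List.pyGet? schedule j ≠ none := by
    intro hnone
    rw [PySem.List.pyGet?_eq_none_iff] at hnone
    simp [PySem.Raise.InRange] at hnone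
    omega
  cases hg : PySem.List.pyGet? schedule j with
  | none => exact absurd hg hn
  | some v => simp [PySem.List.pyGetD, hg]

-- map pyGetD over range(a, n-1) is (drop a).dropLast, for 0 ≤ a ≤ n-1
lemma mapRange_nonneg (schedule : List Int) (a : Int) (h0 : 0 ≤ a)
    (h1 : a ≤ (schedule.length : Int) - 1) :
    (PySem.List.pyRange a ((schedule.length : Int) - 1) 1).map
        (fun j => PySem.List.pyGetD schedule j 0)
      = (schedule.drop a.toNat).dropLast := by
  have hsplit := PySem.List.pyRange_one_append a ((schedule.length : Int) - 1)
      (schedule.length : Int) h1 (by omega)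
  have hfull := PySem.List.map_pyGetD_pyRange' (xs := schedule) (a := a) (d := 0) h0
  have hsing : PySem.List.pyRange ((schedule.length : Int) - 1) (schedule.length : Int) 1
      = [(schedule.length : Int) - 1] := by
    have := PySem.List.pyRange_one_singleton ((schedule.length : Int) - 1)
    simpa using this
  rw [hsplit, List.map_append, hsing] at hfull
  have h2 := congrArg List.dropLast hfull
  simp only [List.map_cons, List.map_nil] at h2
  rwa [List.dropLast_concat] at h2

-- the values A's loop visits equal B's window slice, for 0 ≤ i
lemma visited_eq (schedule : List Int) (i : Int) (hi : 0 ≤ i) :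
    (PySem.List.pyRange i ((schedule.length : Int) - 1) 1).map
        (fun j => PySem.List.pyGetD schedule j 0)
      = PySem.List.slice schedule (some i) (some ((schedule.length : Int) - 1)) := by
  by_cases hemp : (schedule.length : Int) - 1 ≤ i
  · rw [PySem.List.pyRange_one_eq_nil hemp]
    by_cases hn : schedule.length = 0
    · rw [List.map_nil]
      refine (List.eq_nil_of_length_eq_zero ?_).symm
      rw [PySem.List.length_slice]
      have ha := PySem.List.clampIdx_le schedule.length ((schedule.length : Int) - 1)
      omega
    · rw [PySem.List.slice_toNat schedule hi (by omega)]
      have h0 : ((schedule.length : Int) - 1).toNat - i.toNat = 0 := by omega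
      rw [h0]
      simp
  · push_neg at hemp
    rw [mapRange_nonneg schedule i hi (by omega)]
    have hb : (0:Int) ≤ (schedule.length : Int) - 1 := by omega
    rw [PySem.List.slice_toNat schedule hi hb]
    rw [List.dropLast_eq_take]
    congr 1
    simp [List.length_drop]
    omega

-- ===== VERDICT (by name: the statement is the Claim_ definition above) =====
theorem detect_illegal_divisions_helper_spec : Claim_equal_detect_illegal_divisions_helper := by
  intro schedule i item _dom hpre
  unfold Spec_detect_illegal_divisions_helper detect_illegal_divisions_helper detect_illegal_divisions_helper_alt
  have hi : 0 ≤ i := hpre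
  have hmem : ∀ j ∈ PySem.List.pyRange i ((schedule.length : Int) - 1) 1,
      PySem.List.pyGet? schedule j = some (PySem.List.pyGetD schedule j 0) := by
    intro j hj
    rw [PySem.List.mem_pyRange_one] at hj
    exact pyGet?_eq_some_pyGetD schedule j (by omega) (by omega)
  rw [pvALoop_eq_pvScan schedule item _ hmem 0 false, pvScan_false, visited_eq schedule i hi]
  simp only []
  norm_num
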